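-- pv_equiv track=rewrite | github.com/amillner/pyiat | pyiat/pyiat.py | error_fastslow_column_names
-- ===== SOURCE A (Python) =====
-- def error_fastslow_column_names(cond1,cond2,fast_rt,slow_rt,blocks,weighted):
--     '''
--     Provide names for columns that include the condition name as well as the ms entered for too fast\too slow trials.
--
--     08-2017
--     Alexander Millner <alexmillner@gmail.com
--     '''
--     if weighted == True:
--
--         #All column names for output
--         col_names=['overall_error_rate','%s_error_rate'%cond1,'%s_error_rate'%cond2]
--         for bl in range(1,int(len(blocks)/2)+1):
--             col_names.append('%s_bl%d_error_rate'%(cond1,bl))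
--             col_names.append('%s_bl%s_error_rate'%(cond2,bl))
--
--         col_names.extend(['overall_fast_rt_rate_%dms'%(fast_rt),\
--         '%s_fast_rt_rate_%dms'%(cond1,fast_rt),'%s_fast_rt_rate_%dms'%(cond2,fast_rt)])
--         for bl in range(1,int(len(blocks)/2)+1):
--             col_names.append('%s_bl%d_fast_rt_rate_%dms'%(cond1,bl,fast_rt))
--             col_names.append('%s_bl%d_fast_rt_rate_%dms'%(cond2,bl,fast_rt))
--
--         col_names.extend(['overall_slow_rt_rate_%dms'%(slow_rt),\
--         '%s_slow_rt_rate_%dms'%(cond1,slow_rt),'%s_slow_rt_rate_%dms'%(cond2,slow_rt)])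
--         for bl in range(1,int(len(blocks)/2)+1):
--             col_names.append('%s_bl%d_slow_rt_rate_%dms'%(cond1,bl,slow_rt))
--             col_names.append('%s_bl%d_slow_rt_rate_%dms'%(cond2,bl,slow_rt))
--         col_names.append('num_blocks')
--
--     elif weighted == False:
--
--         #All column names for output
--         col_names=['overall_error_rate','%s_error_rate'%cond1,'%s_error_rate'%cond2,\
--
--         'overall_fast_rt_rate_%dms'%(fast_rt),\
--         '%s_fast_rt_rate_%dms'%(cond1,fast_rt),'%s_fast_rt_rate_%dms'%(cond2,fast_rt),\
--
--         'overall_slow_rt_rate_%dms'%(slow_rt),\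
--         '%s_slow_rt_rate_%dms'%(cond1,slow_rt),'%s_slow_rt_rate_%dms'%(cond2,slow_rt)]
--
--     #Column names for 1\0 output regarding which criteria were flagged (errors, too many fast or slow trials)
--     flag_col_names= ['%s_flag'%i for i in col_names]
--
--     return(col_names,flag_col_names)
-- ===== SOURCE B (Python) =====
-- def error_fastslow_column_names(cond1, cond2, fast_rt, slow_rt, blocks, weighted):
--     '''Descriptor-table version: one uniform pass over the metric suffixes.'''
--     metrics = ['error_rate', 'fast_rt_rate_%dms' % fast_rt, 'slow_rt_rate_%dms' % slow_rt]
--     n_bl = len(blocks) // 2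
--     col_names = []
--     for m in metrics:
--         col_names += ['overall_' + m, cond1 + '_' + m, cond2 + '_' + m]
--         if weighted:
--             for bl in range(1, n_bl + 1):
--                 col_names += ['%s_bl%d_%s' % (cond1, bl, m), '%s_bl%d_%s' % (cond2, bl, m)]
--     if weighted:
--         col_names.append('num_blocks')
--     flag_col_names = [c + '_flag' for c in col_names]
--     return (col_names, flag_col_names)
-- ===== Notes on version B (the rewrite author's own statement) =====
-- stated objective: simpler
-- what changed: A's three copy-pasted sections (error/fast/slow, each with its own unrolled header triple and block loop) are replaced by a precomputed metric-suffix table and one uniform pass that appends the overall/cond1/cond2 names and, when weighted, the per-block names for each metric.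
import Mathlib
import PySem

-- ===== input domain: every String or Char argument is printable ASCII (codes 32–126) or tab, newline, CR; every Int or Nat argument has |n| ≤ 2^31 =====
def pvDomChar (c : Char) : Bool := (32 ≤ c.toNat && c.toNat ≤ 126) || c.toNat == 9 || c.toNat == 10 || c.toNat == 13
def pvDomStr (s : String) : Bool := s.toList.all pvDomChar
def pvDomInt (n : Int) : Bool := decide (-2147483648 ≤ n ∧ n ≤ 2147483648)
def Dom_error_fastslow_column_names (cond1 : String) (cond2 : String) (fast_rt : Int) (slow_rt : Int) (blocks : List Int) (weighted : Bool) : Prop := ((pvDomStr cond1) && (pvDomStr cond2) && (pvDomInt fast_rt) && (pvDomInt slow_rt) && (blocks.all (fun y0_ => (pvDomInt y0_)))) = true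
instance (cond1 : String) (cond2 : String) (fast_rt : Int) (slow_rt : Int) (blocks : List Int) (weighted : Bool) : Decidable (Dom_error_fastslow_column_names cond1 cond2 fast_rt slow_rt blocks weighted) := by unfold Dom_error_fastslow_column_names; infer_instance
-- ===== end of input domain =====

-- B replaces A's three copy-pasted name sections by one uniform pass over a precomputed
-- metric-suffix table (objective: simpler).

-- ===== PORT A =====
-- int(len(blocks)/2): true division then int() truncates toward zero; since len(blocks) ≥ 0
-- this is exactly floor division, ported as PySem.Int.floordiv.
def error_fastslow_column_names (cond1 : String) (cond2 : String) (fast_rt : Int) (slow_rt : Int) (blocks : List Int) (weighted : Bool) : List String × List String :=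
  let half : Int := PySem.Int.floordiv (blocks.length : Int) 2
  let col_names : List String :=
    if weighted then
      let c := ["overall_error_rate", cond1 ++ "_error_rate", cond2 ++ "_error_rate"]
      let c := (PySem.List.pyRange 1 (half + 1) 1).foldl (fun acc bl =>
        (acc ++ [cond1 ++ "_bl" ++ PySem.Int.toStr bl ++ "_error_rate"]) ++
          [cond2 ++ "_bl" ++ PySem.Int.toStr bl ++ "_error_rate"]) c
      let c := c ++ ["overall_fast_rt_rate_" ++ PySem.Int.toStr fast_rt ++ "ms",
                     cond1 ++ "_fast_rt_rate_" ++ PySem.Int.toStr fast_rt ++ "ms",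
                     cond2 ++ "_fast_rt_rate_" ++ PySem.Int.toStr fast_rt ++ "ms"]
      let c := (PySem.List.pyRange 1 (half + 1) 1).foldl (fun acc bl =>
        (acc ++ [cond1 ++ "_bl" ++ PySem.Int.toStr bl ++ "_fast_rt_rate_" ++ PySem.Int.toStr fast_rt ++ "ms"]) ++
          [cond2 ++ "_bl" ++ PySem.Int.toStr bl ++ "_fast_rt_rate_" ++ PySem.Int.toStr fast_rt ++ "ms"]) c
      let c := c ++ ["overall_slow_rt_rate_" ++ PySem.Int.toStr slow_rt ++ "ms",
                     cond1 ++ "_slow_rt_rate_" ++ PySem.Int.toStr slow_rt ++ "ms",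
                     cond2 ++ "_slow_rt_rate_" ++ PySem.Int.toStr slow_rt ++ "ms"]
      let c := (PySem.List.pyRange 1 (half + 1) 1).foldl (fun acc bl =>
        (acc ++ [cond1 ++ "_bl" ++ PySem.Int.toStr bl ++ "_slow_rt_rate_" ++ PySem.Int.toStr slow_rt ++ "ms"]) ++
          [cond2 ++ "_bl" ++ PySem.Int.toStr bl ++ "_slow_rt_rate_" ++ PySem.Int.toStr slow_rt ++ "ms"]) c
      c ++ ["num_blocks"]
    else
      ["overall_error_rate", cond1 ++ "_error_rate", cond2 ++ "_error_rate",
       "overall_fast_rt_rate_" ++ PySem.Int.toStr fast_rt ++ "ms",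
       cond1 ++ "_fast_rt_rate_" ++ PySem.Int.toStr fast_rt ++ "ms",
       cond2 ++ "_fast_rt_rate_" ++ PySem.Int.toStr fast_rt ++ "ms",
       "overall_slow_rt_rate_" ++ PySem.Int.toStr slow_rt ++ "ms",
       cond1 ++ "_slow_rt_rate_" ++ PySem.Int.toStr slow_rt ++ "ms",
       cond2 ++ "_slow_rt_rate_" ++ PySem.Int.toStr slow_rt ++ "ms"]
  (col_names, col_names.map (fun i => i ++ "_flag"))

-- ===== PORT B =====
def error_fastslow_column_names_alt (cond1 : String) (cond2 : String) (fast_rt : Int) (slow_rt : Int) (blocks : List Int) (weighted : Bool) : List String × List String :=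
  let metrics : List String := ["error_rate",
    "fast_rt_rate_" ++ PySem.Int.toStr fast_rt ++ "ms",
    "slow_rt_rate_" ++ PySem.Int.toStr slow_rt ++ "ms"]
  let n_bl : Int := PySem.Int.floordiv (blocks.length : Int) 2
  let col_names : List String := metrics.foldl (fun acc m =>
    let acc := acc ++ ["overall_" ++ m, cond1 ++ "_" ++ m, cond2 ++ "_" ++ m]
    if weighted then
      (PySem.List.pyRange 1 (n_bl + 1) 1).foldl (fun acc2 bl =>
        acc2 ++ [cond1 ++ "_bl" ++ PySem.Int.toStr bl ++ "_" ++ m,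
                 cond2 ++ "_bl" ++ PySem.Int.toStr bl ++ "_" ++ m]) acc
    else acc) []
  let col_names := if weighted then col_names ++ ["num_blocks"] else col_names
  (col_names, col_names.map (fun c => c ++ "_flag"))

-- ===== PRECONDITION & SPEC =====
def Spec_error_fastslow_column_names (cond1 : String) (cond2 : String) (fast_rt : Int) (slow_rt : Int) (blocks : List Int) (weighted : Bool) (out : List String × List String) : Prop := out = error_fastslow_column_names_alt cond1 cond2 fast_rt slow_rt blocks weighted
instance (cond1 : String) (cond2 : String) (fast_rt : Int) (slow_rt : Int) (blocks : List Int) (weighted : Bool) (out : List String × List String) : Decidable (Spec_error_fastslow_column_names cond1 cond2 fast_rt slow_rt blocks weighted out) := by unfold Spec_error_fastslow_column_names; infer_instance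

-- ===== CLAIM (what is proved, stated in full; the proofs are below) =====
def Claim_equal_error_fastslow_column_names : Prop := ∀ (cond1 : String) (cond2 : String) (fast_rt : Int) (slow_rt : Int) (blocks : List Int) (weighted : Bool), Dom_error_fastslow_column_names cond1 cond2 fast_rt slow_rt blocks weighted → Spec_error_fastslow_column_names cond1 cond2 fast_rt slow_rt blocks weighted (error_fastslow_column_names cond1 cond2 fast_rt slow_rt blocks weighted)

-- ===== LEMMAS AND PROOFS =====

-- merge two adjacent string literals inside a right-associated append chain
theorem str_lit_merge (a b c : String) (h : a ++ b = c) (s : String) :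
    a ++ (b ++ s) = c ++ s := by rw [← String.append_assoc, h]

theorem error_fastslow_eq (cond1 : String) (cond2 : String) (fast_rt : Int) (slow_rt : Int) (blocks : List Int) (weighted : Bool) :
    error_fastslow_column_names cond1 cond2 fast_rt slow_rt blocks weighted
      = error_fastslow_column_names_alt cond1 cond2 fast_rt slow_rt blocks weighted := by
  cases weighted <;>
    simp [error_fastslow_column_names, error_fastslow_column_names_alt,
      String.append_assoc, List.append_assoc,
      str_lit_merge "overall_" "fast_rt_rate_" "overall_fast_rt_rate_" rfl,
      str_lit_merge "_" "fast_rt_rate_" "_fast_rt_rate_" rfl,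
      str_lit_merge "overall_" "slow_rt_rate_" "overall_slow_rt_rate_" rfl,
      str_lit_merge "_" "slow_rt_rate_" "_slow_rt_rate_" rfl,
      (show ("_" : String) ++ "error_rate" = "_error_rate" from rfl),
      (show ("overall_" : String) ++ "error_rate" = "overall_error_rate" from rfl)]

-- ===== VERDICT (by name: the statement is the Claim_ definition above) =====
theorem error_fastslow_column_names_spec : Claim_equal_error_fastslow_column_names := by
  intro cond1 cond2 fast_rt slow_rt blocks weighted _
  exact error_fastslow_eq cond1 cond2 fast_rt slow_rt blocks weighted
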